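-- pv_equiv track=rewrite | github.com/MLiu666/EvoWrite | assistant_agent.py | _format_language_feedback
-- ===== SOURCE A (Python) =====
-- from typing import Dict, List, Optional, Tuple
--
-- def _format_language_feedback(analysis: Dict) -> str:
--     """Format language analysis into readable feedback."""
--     feedback = []
--
--     if analysis['grammar_issues']:
--         feedback.append("**Grammar Suggestions:**")
--         for issue in analysis['grammar_issues'][:3]:  # Limit to top 3
--             feedback.append(f"- Consider revising: '{issue}'")
--
--     if analysis['vocabulary_suggestions']:
--         feedback.append("\n**Vocabulary Enhancements:**")
--         for suggestion in analysis['vocabulary_suggestions'][:3]: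
--             feedback.append(f"- Try using more specific words instead of: '{suggestion}'")
--
--     return '\n'.join(feedback) if feedback else "Your language use looks good overall!"
-- ===== SOURCE B (Python) =====
-- def _format_language_feedback(analysis):
--     """Format language analysis into readable feedback.
--
--     Builds the result string directly by recursive concatenation
--     (no intermediate list, no join)."""
--     grammar = analysis['grammar_issues']
--     vocab = analysis['vocabulary_suggestions']
--
--     def lines(items, k, prefix, suffix):
--         # recursively render up to k items, each preceded by a newline
--         if k == 0 or not items:
--             return ""
--         return "\n" + prefix + items[0] + suffix + lines(items[1:], k - 1, prefix, suffix)
--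
--     out = ""
--     if grammar:
--         out += "**Grammar Suggestions:**" + lines(grammar, 3, "- Consider revising: '", "'")
--     if vocab:
--         out += ("\n" if out else "") + "\n**Vocabulary Enhancements:**" + \
--                lines(vocab, 3, "- Try using more specific words instead of: '", "'")
--     return out if out else "Your language use looks good overall!"
-- ===== Notes on version B (the rewrite author's own statement) =====
-- stated objective: alternative
-- what changed: B builds the result string directly by recursive concatenation (a counted recursion renders up to 3 newline-prefixed lines per section onto a growing string), instead of A's append-to-a-list of lines followed by '\n'.join; keys are read in the same order and the fallback string is kept.
import Mathlib
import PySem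

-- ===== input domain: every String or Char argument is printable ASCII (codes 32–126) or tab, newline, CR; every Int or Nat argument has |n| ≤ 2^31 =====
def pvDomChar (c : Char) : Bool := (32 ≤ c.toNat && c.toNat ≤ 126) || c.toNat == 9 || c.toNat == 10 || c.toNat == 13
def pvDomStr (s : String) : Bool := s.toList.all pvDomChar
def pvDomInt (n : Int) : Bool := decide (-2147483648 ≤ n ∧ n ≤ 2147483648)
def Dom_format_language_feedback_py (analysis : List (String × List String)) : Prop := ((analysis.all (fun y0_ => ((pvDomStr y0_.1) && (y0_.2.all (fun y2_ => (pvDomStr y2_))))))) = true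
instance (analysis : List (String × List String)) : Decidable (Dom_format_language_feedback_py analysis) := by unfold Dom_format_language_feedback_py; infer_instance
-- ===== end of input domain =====

-- B builds the result string directly by recursive concatenation instead of A's list-of-lines + '\n'.join; same output.

-- ===== PORT A =====
def format_language_feedback_py (analysis : List (String × List String)) : String :=
  let feedback : List String := []
  let grammar := ((PySem.Dict.mk analysis).get? "grammar_issues").getD []
  let feedback :=
    if grammar ≠ [] then
      (feedback ++ ["**Grammar Suggestions:**"]) ++
        (PySem.List.slice grammar none (some 3)).map
          (fun issue => "- Consider revising: '" ++ issue ++ "'")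
    else feedback
  let vocab := ((PySem.Dict.mk analysis).get? "vocabulary_suggestions").getD []
  let feedback :=
    if vocab ≠ [] then
      (feedback ++ ["\n**Vocabulary Enhancements:**"]) ++
        (PySem.List.slice vocab none (some 3)).map
          (fun s => "- Try using more specific words instead of: '" ++ s ++ "'")
    else feedback
  if feedback ≠ [] then PySem.Str.join "\n" feedback
  else "Your language use looks good overall!"

-- ===== PORT B =====
-- recursive rendering of up to k items, each preceded by a newline (B's inner helper `lines`)
def pvLines (pre suf : String) : List String → Nat → String
  | _, 0 => ""
  | [], _ => ""
  | x :: xs, Nat.succ k => "\n" ++ pre ++ x ++ suf ++ pvLines pre suf xs k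

def format_language_feedback_py_alt (analysis : List (String × List String)) : String :=
  let grammar := ((PySem.Dict.mk analysis).get? "grammar_issues").getD []
  let vocab := ((PySem.Dict.mk analysis).get? "vocabulary_suggestions").getD []
  let out :=
    if grammar ≠ [] then
      "**Grammar Suggestions:**" ++ pvLines "- Consider revising: '" "'" grammar 3
    else ""
  let out :=
    if vocab ≠ [] then
      out ++ (if out ≠ "" then "\n" else "") ++ "\n**Vocabulary Enhancements:**" ++
        pvLines "- Try using more specific words instead of: '" "'" vocab 3
    else out
  if out ≠ "" then out else "Your language use looks good overall!"

-- ===== PRECONDITION & SPEC =====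
-- Pre_ excludes dicts missing either key: there Python A raises KeyError (and B raises it too).
def Pre_format_language_feedback_py (analysis : List (String × List String)) : Prop :=
  ((PySem.Dict.mk analysis).get? "grammar_issues").isSome = true ∧
  ((PySem.Dict.mk analysis).get? "vocabulary_suggestions").isSome = true
instance (analysis : List (String × List String)) : Decidable (Pre_format_language_feedback_py analysis) := by unfold Pre_format_language_feedback_py; infer_instance

def pvWitness_format_language_feedback_py : (List (String × List String)) :=
  [("grammar_issues", ["its a issue"]), ("vocabulary_suggestions", ["good"])]

def Spec_format_language_feedback_py (analysis : List (String × List String)) (out : String) : Prop := out = format_language_feedback_py_alt analysis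
instance (analysis : List (String × List String)) (out : String) : Decidable (Spec_format_language_feedback_py analysis out) := by unfold Spec_format_language_feedback_py; infer_instance

-- ===== CLAIM (what is proved, stated in full; the proofs are below) =====
def Claim_equal_format_language_feedback_py : Prop := ∀ (analysis : List (String × List String)), Dom_format_language_feedback_py analysis → Pre_format_language_feedback_py analysis → Spec_format_language_feedback_py analysis (format_language_feedback_py analysis)

-- ===== LEMMAS AND PROOFS =====

-- a block header joined with its ≤3 rendered lines equals header ++ the recursive rendering
theorem join_block (pre suf h : String) (l : List String) :
    PySem.Str.join "\n" (h :: (PySem.List.slice l none (some 3)).map (fun x => pre ++ x ++ suf))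
      = h ++ pvLines pre suf l 3 := by
  match l with
  | [] => simp [PySem.Str.join, pvLines, PySem.List.slice]
  | [a] =>
    simp only [PySem.List.slice, PySem.Str.join, List.map]
    refine (congrArg String.ofList ?_).trans String.ofList_toList
    simp [pvLines, PySem.Chars.join, List.intercalate, String.toList_append]
  | [a, b] =>
    simp only [PySem.List.slice, PySem.Str.join, List.map]
    refine (congrArg String.ofList ?_).trans String.ofList_toList
    simp [pvLines, PySem.Chars.join, List.intercalate, String.toList_append]
  | a :: b :: c :: rest =>
    have hs : PySem.List.slice (a :: b :: c :: rest) none (some 3) = [a, b, c] := by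
      simp [PySem.List.slice]
    rw [hs]
    simp only [PySem.Str.join, List.map]
    refine (congrArg String.ofList ?_).trans String.ofList_toList
    simp [pvLines, PySem.Chars.join, List.intercalate, String.toList_append]

-- '\n'.join over a split of the line list into two nonempty halves
theorem join_cons2 (a b : String) (L : List String) :
    PySem.Str.join "\n" (a :: b :: L) = a ++ "\n" ++ PySem.Str.join "\n" (b :: L) := by
  refine (congrArg String.ofList ?_).trans String.ofList_toList
  simp [PySem.Str.join, PySem.Chars.join, List.intercalate, String.toList_append]

theorem join_one (a : String) : PySem.Str.join "\n" [a] = a := by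
  refine (congrArg String.ofList ?_).trans String.ofList_toList
  simp [PySem.Chars.join, List.intercalate]

theorem join_append (a : String) (L1 : List String) (b : String) (L2 : List String) :
    PySem.Str.join "\n" (a :: (L1 ++ b :: L2))
      = PySem.Str.join "\n" (a :: L1) ++ "\n" ++ PySem.Str.join "\n" (b :: L2) := by
  induction L1 generalizing a with
  | nil => rw [List.nil_append, join_cons2, join_one]
  | cons x xs ih =>
    have h1 : a :: ((x :: xs) ++ b :: L2) = a :: x :: (xs ++ b :: L2) := by simp
    rw [h1, join_cons2, ih x, join_cons2 a x xs]
    simp [String.append_assoc]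

theorem append_ne_empty_left (s t : String) (hs : s ≠ "") : s ++ t ≠ "" := by
  intro h
  have := congrArg String.toList h
  simp [String.toList_append] at this
  exact hs this.1

theorem format_language_feedback_py_spec : Claim_equal_format_language_feedback_py := by
  intro analysis _ _
  unfold Spec_format_language_feedback_py format_language_feedback_py format_language_feedback_py_alt
  set g := ((PySem.Dict.mk analysis).get? "grammar_issues").getD [] with hg
  set v := ((PySem.Dict.mk analysis).get? "vocabulary_suggestions").getD [] with hv
  by_cases hG : g = []
  · by_cases hV : v = []
    · simp [hG, hV]
    · simp [hG, hV]
      exact join_block _ _ _ v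
  · by_cases hV : v = []
    · have hne : ("**Grammar Suggestions:**" ++ pvLines "- Consider revising: '" "'" g 3) ≠ "" :=
        append_ne_empty_left _ _ (by decide)
      simp [hG, hV, hne]
      exact join_block _ _ _ g
    · have hne : ("**Grammar Suggestions:**" ++ pvLines "- Consider revising: '" "'" g 3) ≠ "" :=
        append_ne_empty_left _ _ (by decide)
      simp [hG, hV, hne]
      rw [join_append, join_block, join_block]
      simp [String.append_assoc]
      rw [← String.append_assoc]
      congr 1
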